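-- pv_equiv track=rewrite | github.com/99blakeD99/fscompliance | fscompliance/intelligence/requirement_extraction.py | _determine_requirement_scope
-- ===== SOURCE A (Python) =====
-- from enum import Enum
-- from typing import Any, Dict, List, Optional, Set, Tuple
--
-- class RequirementScope(str, Enum):
--     """Scope of requirement applicability."""
--     MANDATORY = "mandatory"          # Must comply
--     CONDITIONAL = "conditional"      # Applies under conditions
--     GUIDANCE = "guidance"           # Recommended practice
--     EVIDENTIAL = "evidential"       # Supporting evidence
--     DEFINITIONAL = "definitional"   # Definitions and interpretations
--
-- def _determine_requirement_scope(features: Dict[str, List[str]]) -> RequirementScope: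
--     """Determine the scope of the requirement based on features."""
--
--     modal_verbs = [verb.lower() for verb in features.get("modal_verbs", [])]
--
--     # Mandatory requirements
--     if any(modal in modal_verbs for modal in ["must", "shall", "required", "obliged"]):
--         return RequirementScope.MANDATORY
--
--     # Conditional requirements
--     elif any(modal in modal_verbs for modal in ["should", "ought", "expected"]):
--         return RequirementScope.CONDITIONAL
--
--     # Guidance
--     elif any(modal in modal_verbs for modal in ["may", "could", "might", "consider"]):
--         return RequirementScope.GUIDANCE
--
--     # Default to guidance for unclear cases
--     return RequirementScope.GUIDANCE
-- ===== SOURCE B (Python) =====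
-- from enum import Enum
--
--
-- class RequirementScope(str, Enum):
--     """Scope of requirement applicability."""
--     MANDATORY = "mandatory"
--     CONDITIONAL = "conditional"
--     GUIDANCE = "guidance"
--     EVIDENTIAL = "evidential"
--     DEFINITIONAL = "definitional"
--
--
-- _SCOPE_RANK = {
--     "must": 0, "shall": 0, "required": 0, "obliged": 0,
--     "should": 1, "ought": 1, "expected": 1,
--     "may": 2, "could": 2, "might": 2, "consider": 2,
-- }
--
-- _RANK_SCOPE = (
--     RequirementScope.MANDATORY,
--     RequirementScope.CONDITIONAL,
--     RequirementScope.GUIDANCE,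
--     RequirementScope.GUIDANCE,  # default for unclear cases
-- )
--
--
-- def _determine_requirement_scope(features):
--     """Determine the scope of the requirement based on features."""
--     best = 3
--     for verb in features.get("modal_verbs", []):
--         rank = _SCOPE_RANK.get(verb.lower(), 3)
--         if rank < best:
--             best = rank
--     return _RANK_SCOPE[best]
-- ===== Notes on version B (the rewrite author's own statement) =====
-- stated objective: alternative
-- what changed: Replaces three fixed-set any()-membership scans over a precomputed lowercased list with a single table-driven pass that lowercases each verb once and keeps the minimum priority rank, mapped back to a scope at the end.
import Mathlib
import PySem

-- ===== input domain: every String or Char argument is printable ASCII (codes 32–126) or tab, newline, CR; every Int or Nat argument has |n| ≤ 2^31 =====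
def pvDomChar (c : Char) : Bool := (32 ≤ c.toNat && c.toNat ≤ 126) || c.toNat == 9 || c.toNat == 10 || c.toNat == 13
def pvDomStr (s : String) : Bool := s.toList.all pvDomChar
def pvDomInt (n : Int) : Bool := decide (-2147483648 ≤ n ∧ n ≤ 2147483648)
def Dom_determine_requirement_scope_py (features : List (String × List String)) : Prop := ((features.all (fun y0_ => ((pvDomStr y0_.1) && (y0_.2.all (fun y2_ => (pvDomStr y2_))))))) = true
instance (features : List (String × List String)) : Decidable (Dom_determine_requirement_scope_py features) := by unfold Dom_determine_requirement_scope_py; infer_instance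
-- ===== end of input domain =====

-- B replaces A's three fixed-set any() membership scans over a precomputed lowercased list with
-- one table-driven pass keeping the minimum priority rank (objective: alternative decomposition).

-- ===== PORT A =====
def determine_requirement_scope_py (features : List (String × List String)) : String :=
  let modal_verbs := (PySem.Dict.getD (PySem.Dict.mk features) "modal_verbs" []).map PySem.Str.lower
  if (["must", "shall", "required", "obliged"].any (fun m => modal_verbs.contains m)) then
    "mandatory"
  else if (["should", "ought", "expected"].any (fun m => modal_verbs.contains m)) then
    "conditional"
  else if (["may", "could", "might", "consider"].any (fun m => modal_verbs.contains m)) then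
    "guidance"
  else
    "guidance"

-- ===== PORT B =====
def scopeRankDict : PySem.Dict String Nat :=
  PySem.Dict.mk [("must", 0), ("shall", 0), ("required", 0), ("obliged", 0),
                 ("should", 1), ("ought", 1), ("expected", 1),
                 ("may", 2), ("could", 2), ("might", 2), ("consider", 2)]

def rankScopeList : List String := ["mandatory", "conditional", "guidance", "guidance"]

def determine_requirement_scope_py_alt (features : List (String × List String)) : String :=
  let best := (PySem.Dict.getD (PySem.Dict.mk features) "modal_verbs" []).foldl
    (fun best verb =>
      let rank := PySem.Dict.getD scopeRankDict (PySem.Str.lower verb) 3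
      if rank < best then rank else best) 3
  rankScopeList.getD best "guidance"  -- best is always in 0..3, so the index is in range

-- ===== PRECONDITION & SPEC =====
def Spec_determine_requirement_scope_py (features : List (String × List String)) (out : String) : Prop := out = determine_requirement_scope_py_alt features
instance (features : List (String × List String)) (out : String) : Decidable (Spec_determine_requirement_scope_py features out) := by unfold Spec_determine_requirement_scope_py; infer_instance

-- ===== CLAIM (what is proved, stated in full; the proofs are below) =====
def Claim_equal_determine_requirement_scope_py : Prop := ∀ (features : List (String × List String)), Dom_determine_requirement_scope_py features → Spec_determine_requirement_scope_py features (determine_requirement_scope_py features)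

-- ===== LEMMAS AND PROOFS =====

def pvRank (w : String) : Nat := PySem.Dict.getD scopeRankDict w 3

set_option maxHeartbeats 1000000 in
lemma pvRank_eq_zero_iff (w : String) :
    pvRank w = 0 ↔ (w = "must" ∨ w = "shall" ∨ w = "required" ∨ w = "obliged") := by
  simp only [pvRank, scopeRankDict, PySem.Dict.getD, PySem.Dict.get?_mk_cons]
  split_ifs <;> simp_all [PySem.Dict.get?] <;> tauto

set_option maxHeartbeats 1000000 in
lemma pvRank_eq_one_iff (w : String) :
    pvRank w = 1 ↔ (w = "should" ∨ w = "ought" ∨ w = "expected") := by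
  simp only [pvRank, scopeRankDict, PySem.Dict.getD, PySem.Dict.get?_mk_cons]
  split_ifs <;> simp_all [PySem.Dict.get?] <;> first | tauto | (subst_vars; decide)

lemma pvCond0_iff (vs : List String) :
    (["must", "shall", "required", "obliged"].any
      (fun m => (vs.map PySem.Str.lower).contains m)) = true ↔
    ∃ v ∈ vs, pvRank (PySem.Str.lower v) = 0 := by
  simp only [List.any_cons, List.any_nil, Bool.or_eq_true, Bool.false_eq_true, or_false,
    List.contains_eq_mem, decide_eq_true_eq, List.mem_map, pvRank_eq_zero_iff,
    and_or_left, exists_or]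

lemma pvCond1_iff (vs : List String) :
    (["should", "ought", "expected"].any
      (fun m => (vs.map PySem.Str.lower).contains m)) = true ↔
    ∃ v ∈ vs, pvRank (PySem.Str.lower v) = 1 := by
  simp only [List.any_cons, List.any_nil, Bool.or_eq_true, Bool.false_eq_true, or_false,
    List.contains_eq_mem, decide_eq_true_eq, List.mem_map, pvRank_eq_one_iff,
    and_or_left, exists_or]

lemma pvFoldl_min_le_iff (vs : List String) (b0 r : Nat) :
    vs.foldl (fun best verb =>
      let rank := PySem.Dict.getD scopeRankDict (PySem.Str.lower verb) 3
      if rank < best then rank else best) b0 ≤ r ↔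
    b0 ≤ r ∨ ∃ v ∈ vs, pvRank (PySem.Str.lower v) ≤ r := by
  induction vs generalizing b0 with
  | nil => simp
  | cons v vs ih =>
    simp only [List.foldl_cons, ih, List.mem_cons, pvRank]
    constructor
    · rintro (h | ⟨u, hu, hr⟩)
      · split at h
        · right; exact ⟨v, Or.inl rfl, by omega⟩
        · left; exact h
      · right; exact ⟨u, Or.inr hu, hr⟩
    · rintro (h | ⟨u, hu, hr⟩)
      · left; split <;> omega
      · rcases hu with rfl | hu
        · left; split <;> omega
        · right; exact ⟨u, hu, hr⟩

theorem pv_main (features : List (String × List String)) :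
    determine_requirement_scope_py features = determine_requirement_scope_py_alt features := by
  unfold determine_requirement_scope_py determine_requirement_scope_py_alt
  set vs := PySem.Dict.getD (PySem.Dict.mk features) "modal_verbs" [] with hvs
  clear hvs
  have hfold := pvFoldl_min_le_iff vs 3
  set best := vs.foldl (fun best verb =>
      let rank := PySem.Dict.getD scopeRankDict (PySem.Str.lower verb) 3
      if rank < best then rank else best) 3 with hbest
  simp only [pvCond0_iff, pvCond1_iff]
  by_cases h0 : ∃ v ∈ vs, pvRank (PySem.Str.lower v) = 0
  · have hb : best = 0 := Nat.le_zero.mp ((hfold 0).mpr (Or.inr (by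
      obtain ⟨v, hv, hr⟩ := h0; exact ⟨v, hv, le_of_eq hr⟩)))
    simp [h0, hb, rankScopeList]
  · by_cases h1 : ∃ v ∈ vs, pvRank (PySem.Str.lower v) = 1
    · have hn0 : ¬ best ≤ 0 := by
        intro h
        rcases (hfold 0).mp h with h3 | ⟨v, hv, hr⟩
        · omega
        · exact h0 ⟨v, hv, Nat.le_zero.mp hr⟩
      have hle1 : best ≤ 1 := (hfold 1).mpr (Or.inr (by
        obtain ⟨v, hv, hr⟩ := h1; exact ⟨v, hv, by omega⟩))
      have hb : best = 1 := by omega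
      simp [h0, h1, hb, rankScopeList]
    · have hn1 : ¬ best ≤ 1 := by
        intro h
        rcases (hfold 1).mp h with h3 | ⟨v, hv, hr⟩
        · omega
        · rcases Nat.le_one_iff_eq_zero_or_eq_one.mp hr with h | h
          · exact h0 ⟨v, hv, h⟩
          · exact h1 ⟨v, hv, h⟩
      have hle3 : best ≤ 3 := (hfold 3).mpr (Or.inl le_rfl)
      have hb : best = 2 ∨ best = 3 := by omega
      rcases hb with hb | hb <;> simp [h0, h1, hb, rankScopeList]

-- ===== VERDICT (by name: the statement is the Claim_ definition above) =====
theorem determine_requirement_scope_py_spec : Claim_equal_determine_requirement_scope_py := by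
  intro features _
  unfold Spec_determine_requirement_scope_py
  exact pv_main features
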